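-- pv_equiv track=rewrite | github.com/Priyanshu-codes999/PABL-2CSE25-2410031721 | Internal Class Program/53_Program.py | maxPeopleSeen
-- ===== SOURCE A (Python) =====
-- def maxPeopleSeen(arr):
--     n = len(arr)
--     if n == 0:
--         return 0
--
--     prev_ge = [-1] * n          # nearest index on left with value >= arr[i]
--     next_ge = [n] * n           # nearest index on right with value >= arr[i]
--
--     stack = []
--
--     # Previous Greater or Equal
--     for i in range(n):
--         while stack and arr[stack[-1]] < arr[i]:
--             stack.pop()
--
--         if stack:
--             prev_ge[i] = stack[-1]
--
--         stack.append(i)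
--
--     stack = []
--
--     # Next Greater or Equal
--     for i in range(n - 1, -1, -1):
--         while stack and arr[stack[-1]] < arr[i]:
--             stack.pop()
--
--         if stack:
--             next_ge[i] = stack[-1]
--
--         stack.append(i)
--
--     ans = 1
--
--     for i in range(n):
--         left_seen = i - prev_ge[i] - 1
--         right_seen = next_ge[i] - i - 1
--
--         total = left_seen + right_seen + 1   # include self
--         ans = max(ans, total)
--
--     return ans
-- ===== SOURCE B (Python) =====
-- def maxPeopleSeen(arr):
--     n = len(arr)
--     if n == 0:
--         return 0
--     ans = 1
--     for i, x in enumerate(arr):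
--         left = 0
--         for a in reversed(arr[:i]):
--             if a >= x:
--                 break
--             left += 1
--         right = 0
--         for a in arr[i + 1:]:
--             if a >= x:
--                 break
--             right += 1
--         ans = max(ans, left + right + 1)
--     return ans
-- ===== Notes on version B (the rewrite author's own statement) =====
-- stated objective: simpler
-- what changed: Replaced the two monotonic-stack passes and the three auxiliary arrays by a direct per-index scan: for each building, count strictly-smaller neighbours leftward and rightward until the first one that is >= it.
import Mathlib
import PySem

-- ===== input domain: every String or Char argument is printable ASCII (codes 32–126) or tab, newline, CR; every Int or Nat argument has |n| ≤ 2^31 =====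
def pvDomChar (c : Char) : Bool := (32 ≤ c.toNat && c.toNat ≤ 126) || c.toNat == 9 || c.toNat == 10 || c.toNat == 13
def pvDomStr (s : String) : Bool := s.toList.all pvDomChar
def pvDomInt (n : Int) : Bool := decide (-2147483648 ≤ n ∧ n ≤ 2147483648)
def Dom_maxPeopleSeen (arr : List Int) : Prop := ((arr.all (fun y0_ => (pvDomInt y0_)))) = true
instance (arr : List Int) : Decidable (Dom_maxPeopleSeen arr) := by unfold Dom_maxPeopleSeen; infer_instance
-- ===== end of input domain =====

-- B replaces A's two monotonic-stack passes by a direct per-index scan for strictly smaller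
-- neighbours on each side (simpler, no auxiliary arrays); same return value on all inputs.

-- ===== PORT A =====
-- the inner 'while stack and arr[stack[-1]] < arr[i]: stack.pop()' loop;
-- the stack is kept top-at-head (Python appends/pops at the end, same contents).
-- arr.getD j 0 : every index A reads is in range, so this equals Python's arr[j].
def popA (arr : List Int) (x : Int) : List Nat → List Nat
  | [] => []
  | j :: s => if arr.getD j 0 < x then popA arr x s else j :: s

-- one iteration of either stack pass: pop, record the new top (if any) at index i, push i
def stepA (arr : List Int) (st : List Int × List Nat) (i : Nat) : List Int × List Nat :=
  let s' := popA arr (arr.getD i 0) st.2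
  let p' := match s' with
    | [] => st.1
    | j :: _ => st.1.set i ((j : Int))
  (p', i :: s')

-- 'range(n-1, -1, -1)' : the list [n-1, n-2, …, i]; the port folds over seg n 0
def seg (n i : Nat) : List Nat :=
  if i < n then seg n (i + 1) ++ [i] else []
  termination_by n - i

def maxPeopleSeen (arr : List Int) : Int :=
  let n := arr.length
  if n = 0 then 0
  else
    let pv := (List.range n).foldl (stepA arr) (List.replicate n (-1 : Int), [])
    let nx := (seg n 0).foldl (stepA arr) (List.replicate n (n : Int), [])
    (List.range n).foldl (fun (ans : Int) (i : Nat) =>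
      let left_seen := (i : Int) - pv.1.getD i 0 - 1
      let right_seen := nx.1.getD i 0 - (i : Int) - 1
      max ans (left_seen + right_seen + 1)) 1

-- ===== PORT B =====
-- 'for a in reversed(arr[:i]) / arr[i+1:]: if a >= x: break; count += 1' = takeWhile length
def maxPeopleSeen_alt (arr : List Int) : Int :=
  if arr.length = 0 then 0
  else
    (List.range arr.length).foldl (fun (ans : Int) (i : Nat) =>
      let x := arr.getD i 0
      let left := ((arr.take i).reverse.takeWhile (fun a => decide (a < x))).length
      let right := ((arr.drop (i + 1)).takeWhile (fun a => decide (a < x))).length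
      max ans ((left : Int) + (right : Int) + 1)) 1

-- ===== PRECONDITION & SPEC =====
def Spec_maxPeopleSeen (arr : List Int) (out : Int) : Prop := out = maxPeopleSeen_alt arr
instance (arr : List Int) (out : Int) : Decidable (Spec_maxPeopleSeen arr out) := by unfold Spec_maxPeopleSeen; infer_instance

-- ===== CLAIM (what is proved, stated in full; the proofs are below) =====
def Claim_equal_maxPeopleSeen : Prop := ∀ (arr : List Int), Dom_maxPeopleSeen arr → Spec_maxPeopleSeen arr (maxPeopleSeen arr)

-- ===== LEMMAS AND PROOFS =====

-- the stack of the forward pass after processing indices 0, …, i-1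
def stackF (arr : List Int) : Nat → List Nat
  | 0 => []
  | i + 1 => i :: popA arr (arr.getD i 0) (stackF arr i)

-- the stack of the backward pass after processing indices n-1, …, i
def stackR (arr : List Int) (n i : Nat) : List Nat :=
  if i < n then i :: popA arr (arr.getD i 0) (stackR arr n (i + 1)) else []
  termination_by n - i

-- prev_ge[i] / next_ge[i] as A finally records them
def pgVal (arr : List Int) (i : Nat) : Int :=
  match popA arr (arr.getD i 0) (stackF arr i) with
  | [] => -1
  | j :: _ => (j : Int)

def ngVal (arr : List Int) (i : Nat) : Int :=
  match popA arr (arr.getD i 0) (stackR arr arr.length (i + 1)) with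
  | [] => (arr.length : Int)
  | j :: _ => (j : Int)

lemma popA_popA (arr : List Int) (x y : Int) (h : y ≤ x) (s : List Nat) :
    popA arr x (popA arr y s) = popA arr x s := by
  induction s with
  | nil => rfl
  | cons j t ih =>
    by_cases hy : arr.getD j 0 < y
    · have hx : arr.getD j 0 < x := lt_of_lt_of_le hy h
      simp only [popA]
      rw [if_pos hy, if_pos hx]
      exact ih
    · simp only [popA]
      rw [if_neg hy]
      simp only [popA]

lemma cntL_succ (arr : List Int) (i : Nat) (hi : i < arr.length) (x : Int) :
    ((arr.take (i + 1)).reverse.takeWhile (fun a => decide (a < x))).length =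
      if arr.getD i 0 < x then
        ((arr.take i).reverse.takeWhile (fun a => decide (a < x))).length + 1
      else 0 := by
  have h2 : arr.getD i 0 = arr[i] := List.getD_eq_getElem arr 0 hi
  have h1 : (arr.take (i + 1)).reverse = arr[i] :: (arr.take i).reverse := by
    rw [List.take_succ, List.getElem?_eq_getElem hi]
    simp
  rw [h1, h2, List.takeWhile_cons]
  by_cases hx : arr[i] < x
  · simp [hx]
  · simp [hx]

-- forward pass: the popped stack's top vs. B's leftward scan length
lemma popA_stackF (arr : List Int) :
    ∀ i, i ≤ arr.length → ∀ x : Int,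
      (popA arr x (stackF arr i) = [] ∧
        ((arr.take i).reverse.takeWhile (fun a => decide (a < x))).length = i) ∨
      (∃ j t, popA arr x (stackF arr i) = j :: t ∧ j < i ∧
        ((arr.take i).reverse.takeWhile (fun a => decide (a < x))).length = i - 1 - j) := by
  intro i
  induction i with
  | zero => intro _ x; left; simp [stackF, popA]
  | succ i ih =>
    intro hle x
    have hi : i < arr.length := hle
    have hcnt := cntL_succ arr i hi x
    by_cases hx : arr.getD i 0 < x
    · have hpop : popA arr x (stackF arr (i + 1)) = popA arr x (stackF arr i) := by
        show popA arr x (i :: popA arr (arr.getD i 0) (stackF arr i)) = _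
        simp only [popA]
        rw [if_pos hx]
        exact popA_popA arr x (arr.getD i 0) (le_of_lt hx) _
      rcases ih (le_of_lt hi) x with ⟨he, hc⟩ | ⟨j, t, he, hj, hc⟩
      · left
        refine ⟨by rw [hpop, he], ?_⟩
        rw [hcnt, if_pos hx, hc]
      · right
        refine ⟨j, t, by rw [hpop, he], Nat.lt_succ_of_lt hj, ?_⟩
        rw [hcnt, if_pos hx, hc]
        omega
    · right
      refine ⟨i, popA arr (arr.getD i 0) (stackF arr i), ?_, Nat.lt_succ_self i, ?_⟩
      · show popA arr x (i :: popA arr (arr.getD i 0) (stackF arr i)) = _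
        simp only [popA]
        rw [if_neg hx]
      · rw [hcnt, if_neg hx]
        omega

lemma cntR_cons (arr : List Int) (i : Nat) (hi : i < arr.length) (x : Int) :
    ((arr.drop i).takeWhile (fun a => decide (a < x))).length =
      if arr.getD i 0 < x then
        ((arr.drop (i + 1)).takeWhile (fun a => decide (a < x))).length + 1
      else 0 := by
  have h2 : arr.getD i 0 = arr[i] := List.getD_eq_getElem arr 0 hi
  have h1 : arr.drop i = arr[i] :: arr.drop (i + 1) := List.drop_eq_getElem_cons hi
  rw [h1, h2, List.takeWhile_cons]
  by_cases hx : arr[i] < x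
  · simp [hx]
  · simp [hx]

-- backward pass: the popped stack's top vs. B's rightward scan length
lemma popA_stackR (arr : List Int) :
    ∀ d i, i + d = arr.length → ∀ x : Int,
      (popA arr x (stackR arr arr.length i) = [] ∧
        ((arr.drop i).takeWhile (fun a => decide (a < x))).length = arr.length - i) ∨
      (∃ j t, popA arr x (stackR arr arr.length i) = j :: t ∧ i ≤ j ∧ j < arr.length ∧
        ((arr.drop i).takeWhile (fun a => decide (a < x))).length = j - i) := by
  intro d
  induction d with
  | zero =>
    intro i hi x
    left
    constructor
    · rw [stackR, if_neg (by omega : ¬ i < arr.length)]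
      rfl
    · rw [List.drop_eq_nil_of_le (by omega : arr.length ≤ i)]
      simp
      omega
  | succ d ih =>
    intro i hi x
    have hilt : i < arr.length := by omega
    have hstR : stackR arr arr.length i =
        i :: popA arr (arr.getD i 0) (stackR arr arr.length (i + 1)) := by
      rw [stackR, if_pos hilt]
    have hcnt := cntR_cons arr i hilt x
    by_cases hx : arr.getD i 0 < x
    · have hpop : popA arr x (stackR arr arr.length i) =
          popA arr x (stackR arr arr.length (i + 1)) := by
        rw [hstR]
        simp only [popA]
        rw [if_pos hx]
        exact popA_popA arr x (arr.getD i 0) (le_of_lt hx) _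
      rcases ih (i + 1) (by omega) x with ⟨he, hc⟩ | ⟨j, t, he, hij, hj, hc⟩
      · left
        refine ⟨by rw [hpop, he], ?_⟩
        rw [hcnt, if_pos hx, hc]
        omega
      · right
        refine ⟨j, t, by rw [hpop, he], by omega, hj, ?_⟩
        rw [hcnt, if_pos hx, hc]
        omega
    · right
      refine ⟨i, popA arr (arr.getD i 0) (stackR arr arr.length (i + 1)), ?_,
        le_refl i, hilt, ?_⟩
      · rw [hstR]
        simp only [popA]
        rw [if_neg hx]
      · rw [hcnt, if_neg hx]
        omega

-- the forward fold: stack component and recorded prev_ge entries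
lemma foldF_inv (arr : List Int) (N : Nat) :
    ∀ n, n ≤ N →
      (((List.range n).foldl (stepA arr) (List.replicate N (-1 : Int), [])).2 = stackF arr n) ∧
      (∀ k, k < N →
        (((List.range n).foldl (stepA arr) (List.replicate N (-1 : Int), [])).1.getD k 0 =
          if k < n then pgVal arr k else -1)) ∧
      (((List.range n).foldl (stepA arr) (List.replicate N (-1 : Int), [])).1.length = N) := by
  intro n
  induction n with
  | zero =>
    intro _
    refine ⟨by simp [stackF], ?_, by simp⟩
    intro k hk
    simp [List.getD_eq_getElem?_getD, List.getElem?_replicate, hk]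
  | succ n ih =>
    intro hle
    obtain ⟨hs, hp, hl⟩ := ih (by omega)
    set st := (List.range n).foldl (stepA arr) (List.replicate N (-1 : Int), []) with hst
    have hfold : (List.range (n + 1)).foldl (stepA arr) (List.replicate N (-1 : Int), []) =
        stepA arr st n := by
      rw [List.range_succ, List.foldl_append]
      rfl
    refine ⟨?_, ?_, ?_⟩
    · rw [hfold]
      show n :: popA arr (arr.getD n 0) st.2 = _
      rw [hs]
      rfl
    · intro k hk
      rw [hfold]
      cases hpe : popA arr (arr.getD n 0) (stackF arr n) with
      | nil =>
        simp only [stepA, hs, hpe]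
        by_cases hkn : k = n
        · subst hkn
          rw [hp k hk, if_neg (lt_irrefl k), if_pos (Nat.lt_succ_self k)]
          have : pgVal arr k = -1 := by
            simp only [pgVal]
            rw [hpe]
          rw [this]
        · rw [hp k hk]
          by_cases h1 : k < n
          · rw [if_pos h1, if_pos (by omega : k < n + 1)]
          · rw [if_neg h1, if_neg (by omega : ¬ k < n + 1)]
      | cons j t =>
        simp only [stepA, hs, hpe]
        by_cases hkn : k = n
        · subst hkn
          rw [List.getD_eq_getElem?_getD, List.getElem?_set, if_pos rfl, hl, if_pos hk,
              if_pos (Nat.lt_succ_self k)]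
          have : pgVal arr k = (j : Int) := by
            simp only [pgVal]
            rw [hpe]
          rw [this]
          rfl
        · rw [List.getD_eq_getElem?_getD, List.getElem?_set, if_neg (by omega : ¬ n = k),
              ← List.getD_eq_getElem?_getD, hp k hk]
          by_cases h1 : k < n
          · rw [if_pos h1, if_pos (by omega : k < n + 1)]
          · rw [if_neg h1, if_neg (by omega : ¬ k < n + 1)]
    · rw [hfold]
      cases hpe : popA arr (arr.getD n 0) (stackF arr n) with
      | nil => simp only [stepA, hs, hpe]; exact hl
      | cons j t => simp only [stepA, hs, hpe]; simp [hl]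

-- the backward fold: stack component and recorded next_ge entries
lemma foldR_inv (arr : List Int) (N : Nat) (hN : N = arr.length) :
    ∀ d i, i + d = N →
      (((seg N i).foldl (stepA arr) (List.replicate N (N : Int), [])).2 = stackR arr N i) ∧
      (∀ k, k < N →
        (((seg N i).foldl (stepA arr) (List.replicate N (N : Int), [])).1.getD k 0 =
          if i ≤ k then ngVal arr k else (N : Int))) ∧
      (((seg N i).foldl (stepA arr) (List.replicate N (N : Int), [])).1.length = N) := by
  intro d
  induction d with
  | zero =>
    intro i hi
    rw [seg, if_neg (by omega : ¬ i < N)]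
    refine ⟨by rw [stackR, if_neg (by omega : ¬ i < N)]; rfl, ?_, by simp⟩
    intro k hk
    rw [if_neg (by omega : ¬ i ≤ k)]
    simp [List.getD_eq_getElem?_getD, List.getElem?_replicate, hk]
  | succ d ih =>
    intro i hi
    have hilt : i < N := by omega
    obtain ⟨hs, hp, hl⟩ := ih (i + 1) (by omega)
    set st := (seg N (i + 1)).foldl (stepA arr) (List.replicate N (N : Int), []) with hst
    have hfold : (seg N i).foldl (stepA arr) (List.replicate N (N : Int), []) =
        stepA arr st i := by
      conv_lhs => rw [seg, if_pos hilt]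
      rw [List.foldl_append]
      rfl
    have hstR : stackR arr N i = i :: popA arr (arr.getD i 0) (stackR arr N (i + 1)) := by
      rw [stackR, if_pos hilt]
    refine ⟨?_, ?_, ?_⟩
    · rw [hfold, hstR]
      show i :: popA arr (arr.getD i 0) st.2 = _
      rw [hs]
    · intro k hk
      rw [hfold]
      cases hpe : popA arr (arr.getD i 0) (stackR arr N (i + 1)) with
      | nil =>
        simp only [stepA, hs, hpe]
        by_cases hki : k = i
        · subst hki
          rw [hp k hk, if_neg (by omega : ¬ k + 1 ≤ k), if_pos (le_refl k)]
          have : ngVal arr k = (N : Int) := by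
            simp only [ngVal, ← hN]
            rw [hpe]
          rw [this]
        · rw [hp k hk]
          by_cases h1 : i + 1 ≤ k
          · rw [if_pos h1, if_pos (by omega : i ≤ k)]
          · rw [if_neg h1, if_neg (by omega : ¬ i ≤ k)]
      | cons j t =>
        simp only [stepA, hs, hpe]
        by_cases hki : k = i
        · subst hki
          rw [List.getD_eq_getElem?_getD, List.getElem?_set, if_pos rfl, hl, if_pos hk,
              if_pos (le_refl k)]
          have : ngVal arr k = (j : Int) := by
            simp only [ngVal, ← hN]
            rw [hpe]
          rw [this]
          rfl
        · rw [List.getD_eq_getElem?_getD, List.getElem?_set, if_neg (by omega : ¬ i = k),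
              ← List.getD_eq_getElem?_getD, hp k hk]
          by_cases h1 : i + 1 ≤ k
          · rw [if_pos h1, if_pos (by omega : i ≤ k)]
          · rw [if_neg h1, if_neg (by omega : ¬ i ≤ k)]
    · rw [hfold]
      cases hpe : popA arr (arr.getD i 0) (stackR arr N (i + 1)) with
      | nil => simp only [stepA, hs, hpe]; exact hl
      | cons j t => simp only [stepA, hs, hpe]; simp [hl]

-- ===== VERDICT (by name: the statement is the Claim_ definition above) =====
theorem maxPeopleSeen_spec : Claim_equal_maxPeopleSeen := by
  intro arr _
  unfold Spec_maxPeopleSeen maxPeopleSeen maxPeopleSeen_alt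
  by_cases h0 : arr.length = 0
  · simp [h0]
  · simp only [h0, if_false]
    apply PySem.List.foldl_congr_mem
    intro acc i hi
    have hiN : i < arr.length := List.mem_range.mp hi
    obtain ⟨_, hpF, _⟩ := foldF_inv arr arr.length arr.length (le_refl _)
    obtain ⟨_, hpR, _⟩ := foldR_inv arr arr.length rfl arr.length 0 (by omega)
    rw [hpF i hiN, if_pos hiN, hpR i hiN, if_pos (Nat.zero_le i)]
    congr 1
    rcases popA_stackF arr i (le_of_lt hiN) (arr.getD i 0) with ⟨he, hc⟩ | ⟨j, t, he, hj, hc⟩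
    · have h1 : pgVal arr i = -1 := by simp only [pgVal]; rw [he]
      rcases popA_stackR arr (arr.length - (i + 1)) (i + 1) (by omega) (arr.getD i 0) with
        ⟨he2, hc2⟩ | ⟨j2, t2, he2, hij2, hj2, hc2⟩
      · have h2 : ngVal arr i = (arr.length : Int) := by simp only [ngVal]; rw [he2]
        rw [h1, h2, hc, hc2]
        omega
      · have h2 : ngVal arr i = (j2 : Int) := by simp only [ngVal]; rw [he2]
        rw [h1, h2, hc, hc2]
        omega
    · have h1 : pgVal arr i = (j : Int) := by simp only [pgVal]; rw [he]
      rcases popA_stackR arr (arr.length - (i + 1)) (i + 1) (by omega) (arr.getD i 0) with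
        ⟨he2, hc2⟩ | ⟨j2, t2, he2, hij2, hj2, hc2⟩
      · have h2 : ngVal arr i = (arr.length : Int) := by simp only [ngVal]; rw [he2]
        rw [h1, h2, hc, hc2]
        omega
      · have h2 : ngVal arr i = (j2 : Int) := by simp only [ngVal]; rw [he2]
        rw [h1, h2, hc, hc2]
        omega
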